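-- pv_equiv track=rewrite | github.com/jihyuno0o/studyAlgorithm | 백준/Silver/1244. 스위치 켜고 끄기/스위치 켜고 끄기.py | girl
-- ===== SOURCE A (Python) =====
-- def turn_light(light): #켜고 끄기
--     if light == 0:
--         light = 1
--     else:
--         light = 0
--     return light
--
-- def girl(switch, num): #num을 중심으로 대칭되면 켜고 끄기
--     num -= 1
--     switch[num] = turn_light(switch[num])
--     i = 1
--     while True:
--         if num-i >=0 and num+i <= len(switch)-1:
--             if switch[num+i] == switch[num-i]:
--                 switch[num+i], switch[num-i] = turn_light(switch[num+i]), turn_light(switch[num-i])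
--                 i += 1
--             else:
--                 return switch
--         else:
--             return switch
-- ===== SOURCE B (Python) =====
-- def turn_light(light):
--     if light == 0:
--         light = 1
--     else:
--         light = 0
--     return light
--
-- def girl(switch, num):
--     num -= 1
--     switch[num] = turn_light(switch[num])
--     # measure pass: palindrome radius around num
--     r = 0
--     while num - r - 1 >= 0 and num + r + 1 <= len(switch) - 1 \
--             and switch[num + r + 1] == switch[num - r - 1]:
--         r += 1
--     # write pass
--     for i in range(1, r + 1):
--         switch[num + i] = turn_light(switch[num + i])
--         switch[num - i] = turn_light(switch[num - i])
--     return switch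
-- ===== Notes on version B (the rewrite author's own statement) =====
-- stated objective: alternative
-- what changed: A's single interleaved while-loop that compares and toggles pair by pair is split into two phases: a read-only measure pass that computes the palindrome radius r, then a separate write pass toggling the r symmetric pairs; both keep turn_light and plain indexing, so IndexError and negative-index center behaviour are unchanged.
import Mathlib
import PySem

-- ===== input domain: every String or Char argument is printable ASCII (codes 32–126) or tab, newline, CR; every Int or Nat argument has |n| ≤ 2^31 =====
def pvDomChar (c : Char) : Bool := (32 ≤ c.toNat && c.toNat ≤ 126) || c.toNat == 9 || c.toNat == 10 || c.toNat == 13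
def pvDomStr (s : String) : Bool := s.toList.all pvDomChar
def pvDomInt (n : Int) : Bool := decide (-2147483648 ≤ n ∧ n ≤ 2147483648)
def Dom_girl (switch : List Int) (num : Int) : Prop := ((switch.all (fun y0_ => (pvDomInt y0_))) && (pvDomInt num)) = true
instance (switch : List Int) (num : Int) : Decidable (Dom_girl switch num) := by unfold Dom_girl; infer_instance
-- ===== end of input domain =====

-- B replaces A's single interleaved compare-and-toggle loop by a read-only radius pass
-- followed by a separate write pass (alternative decomposition, same cost).
-- Both Pythons mutate `switch` in place; the equivalence proved here is about the RETURN value.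

-- ===== PORT A =====
-- turn_light, shared verbatim by both Pythons
def turnLight (light : Int) : Int := if light = 0 then 1 else 0

-- the `while True` loop of A; fuel `switch.length + 1` is enough since the guard forces i ≤ len-1
def girlLoop (fuel : Nat) (sw : List Int) (num : Int) (i : Int) : List Int :=
  match fuel with
  | 0 => sw
  | f + 1 =>
    if num - i ≥ 0 ∧ num + i ≤ PySem.List.len sw - 1 then
      -- guard puts num-i, num+i in [0, len-1], so the reads/writes are exact
      let a := PySem.List.pyGetD sw (num + i) 0
      let b := PySem.List.pyGetD sw (num - i) 0
      if a = b then
        girlLoop f (PySem.List.pySetD (PySem.List.pySetD sw (num + i) (turnLight a)) (num - i) (turnLight b)) num (i + 1)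
      else sw
    else sw

def girl (switch : List Int) (num : Int) : List Int :=
  let n := num - 1
  match PySem.List.pyGet? switch n with
  | none => switch   -- Python raises IndexError here; excluded by Pre_girl
  | some v => girlLoop (switch.length + 1) (PySem.List.pySetD switch n (turnLight v)) n 1

-- ===== PORT B =====
-- the measure pass of Source B: extends r while the symmetric pair at distance r+1 matches
def radiusLoop (fuel : Nat) (sw : List Int) (num : Int) (r : Int) : Int :=
  match fuel with
  | 0 => r
  | f + 1 =>
    if num - r - 1 ≥ 0 ∧ num + r + 1 ≤ PySem.List.len sw - 1 ∧
        PySem.List.pyGetD sw (num + r + 1) 0 = PySem.List.pyGetD sw (num - r - 1) 0 then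
      radiusLoop f sw num (r + 1)
    else r

-- the body of Source B's write-pass `for` loop
def writeStep (num : Int) (s : List Int) (i : Int) : List Int :=
  let s' := PySem.List.pySetD s (num + i) (turnLight (PySem.List.pyGetD s (num + i) 0))
  PySem.List.pySetD s' (num - i) (turnLight (PySem.List.pyGetD s' (num - i) 0))

def girl_alt (switch : List Int) (num : Int) : List Int :=
  let n := num - 1
  match PySem.List.pyGet? switch n with
  | none => switch   -- Python raises IndexError here; excluded by Pre_girl
  | some v =>
    let s1 := PySem.List.pySetD switch n (turnLight v)
    let r := radiusLoop (switch.length + 1) s1 n 0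
    (PySem.List.pyRange 1 (r + 1) 1).foldl (writeStep n) s1

-- ===== PRECONDITION & SPEC =====
-- Pre_ excludes exactly the inputs where `switch[num-1]` raises IndexError in both Pythons.
def Pre_girl (switch : List Int) (num : Int) : Prop := PySem.Raise.InRange switch.length (num - 1)
instance (switch : List Int) (num : Int) : Decidable (Pre_girl switch num) := by unfold Pre_girl; infer_instance
def pvWitness_girl : List Int × Int := ([0, 1, 0, 1, 0], 3)

def Spec_girl (switch : List Int) (num : Int) (out : List Int) : Prop := out = girl_alt switch num
instance (switch : List Int) (num : Int) (out : List Int) : Decidable (Spec_girl switch num out) := by unfold Spec_girl; infer_instance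

-- ===== CLAIM (what is proved, stated in full; the proofs are below) =====
def Claim_equal_girl : Prop := ∀ (switch : List Int) (num : Int), Dom_girl switch num → Pre_girl switch num → Spec_girl switch num (girl switch num)

-- ===== LEMMAS AND PROOFS =====

-- number of matching symmetric pairs from distance i outward (proof-side mirror of both loops)
def radCount (f : Nat) (sw : List Int) (num i : Int) : Nat :=
  match f with
  | 0 => 0
  | f + 1 =>
    if num - i ≥ 0 ∧ num + i ≤ PySem.List.len sw - 1 ∧
        PySem.List.pyGetD sw (num + i) 0 = PySem.List.pyGetD sw (num - i) 0 then
      radCount f sw num (i + 1) + 1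
    else 0

theorem radiusLoop_eq_radCount (f : Nat) (sw : List Int) (num : Int) :
    ∀ r : Int, radiusLoop f sw num r = r + (radCount f sw num (r + 1) : Int) := by
  induction f with
  | zero => intro r; simp [radiusLoop, radCount]
  | succ f ih =>
    intro r
    have h1 : num - r - 1 = num - (r + 1) := by ring
    have h2 : num + r + 1 = num + (r + 1) := by ring
    rw [radiusLoop, radCount, h1, h2]
    split_ifs with h
    · rw [ih (r + 1)]; push_cast; ring
    · simp

theorem pyGetD_pySetD_ne (s : List Int) (p q v : Int) (hp : 0 ≤ p) (hq : 0 ≤ q)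
    (hne : p ≠ q) (hq2 : q < (s.length : Int)) :
    PySem.List.pyGetD (PySem.List.pySetD s p v) q 0 = PySem.List.pyGetD s q 0 := by
  rw [PySem.List.pySetD_of_nonneg s v hp,
      PySem.List.pyGetD_eq_getElem (s.set p.toNat v) 0 hq (by simpa using hq2),
      PySem.List.pyGetD_eq_getElem s 0 hq hq2]
  simp only [List.getElem_set]
  rw [if_neg (by omega)]

-- writes at distance i do not change what radCount reads at distances > i
theorem radCount_write_invariant (num : Int) (f : Nat) :
    ∀ (s : List Int) (i j x y : Int), 0 ≤ num - i → num + i ≤ (s.length : Int) - 1 → 1 ≤ i → i < j →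
    radCount f (PySem.List.pySetD (PySem.List.pySetD s (num + i) x) (num - i) y) num j
      = radCount f s num j := by
  induction f with
  | zero => intro s i j x y _ _ _ _; simp [radCount]
  | succ f ih =>
    intro s i j x y hlo hhi hi hij
    have hlen : (((PySem.List.pySetD (PySem.List.pySetD s (num + i) x) (num - i) y)).length : Int)
        = (s.length : Int) := by
      simp [PySem.List.length_pySetD]
    rw [radCount, radCount]
    by_cases hc : num - j ≥ 0 ∧ num + j ≤ (s.length : Int) - 1
    · -- reads at num±j are in range and distinct from the written cells num±i
      have e1 : PySem.List.pyGetD (PySem.List.pySetD (PySem.List.pySetD s (num + i) x) (num - i) y) (num + j) 0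
          = PySem.List.pyGetD s (num + j) 0 := by
        rw [pyGetD_pySetD_ne _ _ _ _ (by omega) (by omega) (by omega)
              (by simp [PySem.List.length_pySetD]; omega),
            pyGetD_pySetD_ne _ _ _ _ (by omega) (by omega) (by omega) (by omega)]
      have e2 : PySem.List.pyGetD (PySem.List.pySetD (PySem.List.pySetD s (num + i) x) (num - i) y) (num - j) 0
          = PySem.List.pyGetD s (num - j) 0 := by
        rw [pyGetD_pySetD_ne _ _ _ _ (by omega) (by omega) (by omega)
              (by simp [PySem.List.length_pySetD]; omega),
            pyGetD_pySetD_ne _ _ _ _ (by omega) (by omega) (by omega) (by omega)]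
      simp only [PySem.List.len_eq, PySem.List.length_pySetD, e1, e2]
      split_ifs with h
      · rw [ih s i (j + 1) x y hlo hhi hi (by omega)]
      · rfl
    · -- the first two conjuncts already fail, identically on both sides
      rw [if_neg (by simp only [PySem.List.len_eq, PySem.List.length_pySetD]; tauto),
          if_neg (by simp only [PySem.List.len_eq]; tauto)]

-- A's interleaved loop from distance i equals B's write pass over the radius from i
theorem girlLoop_eq_fold (num : Int) (f : Nat) :
    ∀ (s : List Int) (i : Int), 1 ≤ i →
    girlLoop f s num i
      = (PySem.List.pyRange i (i + (radCount f s num i : Int)) 1).foldl (writeStep num) s := by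
  induction f with
  | zero =>
    intro s i _
    simp [girlLoop, radCount]
  | succ f ih =>
    intro s i hi
    rw [girlLoop, radCount]
    by_cases hc : num - i ≥ 0 ∧ num + i ≤ PySem.List.len s - 1
    · rw [if_pos hc]
      by_cases he : PySem.List.pyGetD s (num + i) 0 = PySem.List.pyGetD s (num - i) 0
      · rw [if_pos he,
            if_pos (show num - i ≥ 0 ∧ num + i ≤ PySem.List.len s - 1 ∧
                PySem.List.pyGetD s (num + i) 0 = PySem.List.pyGetD s (num - i) 0 from
              ⟨hc.1, hc.2, he⟩)]
        have hc1 : 0 ≤ num - i := hc.1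
        have hc2 : num + i ≤ (s.length : Int) - 1 := by simpa using hc.2
        set s' := PySem.List.pySetD (PySem.List.pySetD s (num + i)
            (turnLight (PySem.List.pyGetD s (num + i) 0))) (num - i)
            (turnLight (PySem.List.pyGetD s (num - i) 0)) with hs'
        have hinv : radCount f s' num (i + 1) = radCount f s num (i + 1) := by
          rw [hs']
          exact radCount_write_invariant num f s i (i + 1) _ _ hc1 hc2 hi (by omega)
        have hstep : writeStep num s i = s' := by
          rw [writeStep, hs']
          congr 1
          rw [pyGetD_pySetD_ne _ _ _ _ (by omega) (by omega) (by omega) (by omega)]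
        have hcons : PySem.List.pyRange i (i + ((radCount f s num (i + 1) + 1 : Nat) : Int)) 1
            = i :: PySem.List.pyRange (i + 1) (i + ((radCount f s num (i + 1) + 1 : Nat) : Int)) 1 := by
          exact PySem.List.pyRange_one_cons (by push_cast; omega)
        rw [hcons, List.foldl_cons, hstep, ih s' (i + 1) (by omega), hinv]
        congr 2
        push_cast; ring
      · rw [if_neg he, if_neg (by tauto)]
        simp
    · rw [if_neg hc, if_neg (by tauto)]
      simp

-- ===== VERDICT (by name: the statement is the Claim_ definition above) =====
theorem girl_spec : Claim_equal_girl := by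
  intro switch num _ _
  unfold Spec_girl girl girl_alt
  cases h : PySem.List.pyGet? switch (num - 1) with
  | none => simp only [h]
  | some v =>
    simp only [h]
    rw [girlLoop_eq_fold (num - 1) (switch.length + 1) _ 1 (by omega),
        radiusLoop_eq_radCount]
    norm_num
    rw [Int.add_comm]
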